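-- pv_equiv track=rewrite | github.com/svnramakanth/self-voice-clone | vclone/apps/api/app/services/prompt_leak.py | _first_target_word_index
-- ===== SOURCE A (Python) =====
-- _STOP_WORDS = {
--     "a", "an", "and", "are", "as", "be", "by", "for", "from", "in", "is", "it",
--     "of", "on", "or", "that", "the", "this", "to", "with",
-- }
--
-- def _first_target_word_index(observed_words: list[str], target_words: list[str]) -> int | None:
--     target_content = [word for word in target_words if word not in _STOP_WORDS]
--     if not target_content:
--         return None
--     for index, word in enumerate(observed_words):
--         if word == target_content[0]:
--             return index
--     for index, word in enumerate(observed_words):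
--         if word in target_content[:3]:
--             return index
--     return None
-- ===== SOURCE B (Python) =====
-- _STOP_WORDS = {
--     "a", "an", "and", "are", "as", "be", "by", "for", "from", "in", "is", "it",
--     "of", "on", "or", "that", "the", "this", "to", "with",
-- }
--
-- def _first_target_word_index(observed_words: list[str], target_words: list[str]) -> int | None:
--     target_content = [word for word in target_words if word not in _STOP_WORDS]
--     if not target_content:
--         return None
--     exact = target_content[0]
--     any3 = target_content[:3]
--     best_exact = None
--     best_any = None
--     for index, word in enumerate(observed_words):
--         if best_exact is None and word == exact:
--             best_exact = index
--         if best_any is None and word in any3: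
--             best_any = index
--     return best_exact if best_exact is not None else best_any
-- ===== Notes on version B (the rewrite author's own statement) =====
-- stated objective: alternative
-- what changed: Replaces A's two sequential scans of observed_words (exact-match scan, then any-of-first-three scan) with a single pass that records the first exact-match index and the first any-match index, preferring the exact one at the end.
import Mathlib
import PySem

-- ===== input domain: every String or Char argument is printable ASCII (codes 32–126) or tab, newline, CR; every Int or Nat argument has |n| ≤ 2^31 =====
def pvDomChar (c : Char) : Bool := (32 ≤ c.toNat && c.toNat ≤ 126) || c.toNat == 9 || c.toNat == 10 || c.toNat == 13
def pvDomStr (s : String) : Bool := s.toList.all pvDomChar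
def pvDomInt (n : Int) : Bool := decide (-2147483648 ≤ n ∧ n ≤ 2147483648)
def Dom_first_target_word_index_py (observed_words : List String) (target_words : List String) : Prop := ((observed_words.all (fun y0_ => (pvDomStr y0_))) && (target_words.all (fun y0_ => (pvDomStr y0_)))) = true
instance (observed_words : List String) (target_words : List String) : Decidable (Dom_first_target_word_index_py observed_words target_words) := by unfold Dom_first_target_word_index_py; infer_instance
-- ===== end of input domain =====

-- B replaces A's two sequential scans of observed_words with a single pass that records the
-- first exact-match index and the first any-of-first-three-match index, preferring the exact
-- one at the end (objective: alternative decomposition, same cost).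

-- ===== PORT A =====
def pvStopWords : List String :=
  ["a", "an", "and", "are", "as", "be", "by", "for", "from", "in", "is", "it",
   "of", "on", "or", "that", "the", "this", "to", "with"]

-- first loop of A: first index with word == target_content[0]
def ftwA_loop1 (t0 : String) : List String → Nat → Option Int
  | [], _ => none
  | w :: ws, i => if w = t0 then some (i : Int) else ftwA_loop1 t0 ws (i + 1)

-- second loop of A: first index with word in target_content[:3]
def ftwA_loop2 (tc3 : List String) : List String → Nat → Option Int
  | [], _ => none
  | w :: ws, i => if w ∈ tc3 then some (i : Int) else ftwA_loop2 tc3 ws (i + 1)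

def ftwA_main (observed_words tc : List String) : Option Int :=
  match tc with
  | [] => none
  | t0 :: _ =>
    match ftwA_loop1 t0 observed_words 0 with
    | some i => some i
    | none => ftwA_loop2 (PySem.List.slice tc none (some 3)) observed_words 0

def first_target_word_index_py (observed_words : List String) (target_words : List String) : Option Int :=
  ftwA_main observed_words (target_words.filter (fun w => !pvStopWords.contains w))

-- ===== PORT B =====
-- single pass of B: best_exact / best_any are set at most once each
def ftwB_scan (t0 : String) (tc3 : List String) : List String → Nat → Option Int → Option Int → Option Int
  | [], _, be, ba => match be with | some e => some e | none => ba
  | w :: ws, i, be, ba =>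
    let be' := if be = none ∧ w = t0 then some (i : Int) else be
    let ba' := if ba = none ∧ w ∈ tc3 then some (i : Int) else ba
    ftwB_scan t0 tc3 ws (i + 1) be' ba'

def ftwB_main (observed_words tc : List String) : Option Int :=
  match tc with
  | [] => none
  | t0 :: _ => ftwB_scan t0 (PySem.List.slice tc none (some 3)) observed_words 0 none none

def first_target_word_index_py_alt (observed_words : List String) (target_words : List String) : Option Int :=
  ftwB_main observed_words (target_words.filter (fun w => !pvStopWords.contains w))

-- ===== PRECONDITION & SPEC =====
def Spec_first_target_word_index_py (observed_words : List String) (target_words : List String) (out : Option Int) : Prop := out = first_target_word_index_py_alt observed_words target_words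
instance (observed_words : List String) (target_words : List String) (out : Option Int) : Decidable (Spec_first_target_word_index_py observed_words target_words out) := by unfold Spec_first_target_word_index_py; infer_instance

-- ===== CLAIM (what is proved, stated in full; the proofs are below) =====
def Claim_equal_first_target_word_index_py : Prop := ∀ (observed_words : List String) (target_words : List String), Dom_first_target_word_index_py observed_words target_words → Spec_first_target_word_index_py observed_words target_words (first_target_word_index_py observed_words target_words)

-- ===== LEMMAS AND PROOFS =====

-- once best_exact is set, the scan returns it
theorem ftwB_scan_exact_fixed (t0 : String) (tc3 obs : List String) (i : Nat) (e : Int) (ba : Option Int) :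
    ftwB_scan t0 tc3 obs i (some e) ba = some e := by
  induction obs generalizing i ba with
  | nil => rfl
  | cons w ws ih => simp [ftwB_scan, ih]

-- with best_any already set, the scan computes A's first loop, falling back to best_any
theorem ftwB_scan_any_fixed (t0 : String) (tc3 obs : List String) (i : Nat) (b : Int) :
    ftwB_scan t0 tc3 obs i none (some b) =
      match ftwA_loop1 t0 obs i with | some e => some e | none => some b := by
  induction obs generalizing i with
  | nil => rfl
  | cons w ws ih =>
    by_cases hw : w = t0 <;>
      simp [ftwB_scan, ftwA_loop1, hw, ftwB_scan_exact_fixed, ih]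

-- the fresh scan computes A's first loop, falling back to A's second loop
theorem ftwB_scan_eq (t0 : String) (tc3 : List String) (h0 : t0 ∈ tc3) (obs : List String) (i : Nat) :
    ftwB_scan t0 tc3 obs i none none =
      match ftwA_loop1 t0 obs i with | some e => some e | none => ftwA_loop2 tc3 obs i := by
  induction obs generalizing i with
  | nil => rfl
  | cons w ws ih =>
    by_cases hw : w = t0
    · subst hw
      simp [ftwB_scan, ftwA_loop1, h0, ftwB_scan_exact_fixed]
    · by_cases hm : w ∈ tc3
      · simp [ftwB_scan, ftwA_loop1, ftwA_loop2, hw, hm, ftwB_scan_any_fixed]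
      · simp [ftwB_scan, ftwA_loop1, ftwA_loop2, hw, hm, ih]

theorem head_mem_slice3 (t0 : String) (rest : List String) :
    t0 ∈ PySem.List.slice (t0 :: rest) none (some 3) := by
  simp [PySem.List.slice, PySem.List.clampIdx]
  have h : min 3 (rest.length + 1) = (min 2 rest.length) + 1 := by omega
  rw [h, List.take_succ_cons]
  simp

theorem ftw_main_eq (obs tc : List String) : ftwA_main obs tc = ftwB_main obs tc := by
  cases tc with
  | nil => rfl
  | cons t0 rest =>
    simp only [ftwA_main, ftwB_main,
      ftwB_scan_eq t0 _ (head_mem_slice3 t0 rest) obs 0]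

-- ===== VERDICT (by name: the statement is the Claim_ definition above) =====
theorem first_target_word_index_py_spec : Claim_equal_first_target_word_index_py := by
  intro obs tgt _
  unfold Spec_first_target_word_index_py first_target_word_index_py first_target_word_index_py_alt
  exact ftw_main_eq obs _
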